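-- pv_equiv track=rewrite | github.com/Grounddriller/LeetCode | grokking-schedule-tasks-on-minimum-machines.py | minimum_machines
-- ===== SOURCE A (Python) =====
-- import heapq
--
-- def minimum_machines(tasks):
--     if not tasks:
--         return 0
--
--     tasks.sort(key=lambda x: x[0])
--
--     min_heap = []
--
--     heapq.heappush(min_heap, tasks[0][1])
--
--     for i in range(1, len(tasks)):
--         start, end = tasks[i]
--
--         if start >= min_heap[0]:
--             heapq.heappop(min_heap)
--
--         heapq.heappush(min_heap, end)
--
--     return len(min_heap)
-- ===== SOURCE B (Python) =====
-- def minimum_machines(tasks):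
--     # Sweep the tasks in order of start time.  When a task starts it needs a
--     # machine of its own, plus one for every earlier task still running
--     # (i.e. whose end is after this start); the answer is the largest such
--     # demand seen.
--     tasks.sort(key=lambda x: x[0])
--     best = 0
--     for i in range(len(tasks)):
--         s = tasks[i][0]
--         running = 1 + sum(1 for _, e in tasks[:i] if e > s)
--         best = max(best, running)
--     return best
-- ===== Notes on version B (the rewrite author's own statement) =====
-- stated objective: alternative
-- what changed: Replaces the heap simulation (push each end, pop the minimum end when a start can reuse a machine) by a direct sweep over the start-sorted tasks: each task needs one machine plus one per earlier task still running at its start, and the answer is the maximum such demand.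
import Mathlib
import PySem

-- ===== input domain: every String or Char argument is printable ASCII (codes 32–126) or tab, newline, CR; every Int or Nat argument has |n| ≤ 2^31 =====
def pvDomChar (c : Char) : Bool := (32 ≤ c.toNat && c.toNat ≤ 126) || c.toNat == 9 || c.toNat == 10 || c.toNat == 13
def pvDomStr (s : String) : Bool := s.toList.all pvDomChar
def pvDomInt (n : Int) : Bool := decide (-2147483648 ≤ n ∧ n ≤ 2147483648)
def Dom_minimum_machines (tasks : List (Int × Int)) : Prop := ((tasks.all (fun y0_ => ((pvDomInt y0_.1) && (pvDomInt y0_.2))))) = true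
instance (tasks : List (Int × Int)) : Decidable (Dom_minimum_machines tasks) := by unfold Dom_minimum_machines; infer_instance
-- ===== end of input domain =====

-- B replaces A's heap simulation by a direct max-demand sweep over the start-sorted tasks
-- (alternative algorithm, not faster).  Both A and B sort `tasks` in place; the equivalence
-- proved here is about the return value (the in-place-sort side effect is the same in A and B).

-- ===== PORT A =====
-- A observes the heapq min-heap only through min_heap[0] (its minimum), heapq.heappop (which
-- removes the minimum) and len; the heap is therefore ported by that contract, as a plain list
-- holding the multiset of end times (push = cons, pop = erase the minimum) — exact for exactly
-- these three operations.
def pvHeapStep (h : List Int) (t : Int × Int) : List Int :=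
  let h1 :=
    match PySem.List.min? h (fun x => x) with
    | some m => if m ≤ t.1 then h.erase m else h   -- 'if start >= min_heap[0]: heapq.heappop(min_heap)'
    | none => h                                    -- unreachable: the heap is never empty in the loop
  t.2 :: h1                                        -- 'heapq.heappush(min_heap, end)'

def minimum_machines (tasks : List (Int × Int)) : Int :=
  if tasks = [] then 0
  else
    let ts := PySem.List.sorted tasks (fun x => x.1) false
    match ts with
    | [] => 0                                      -- unreachable: ts is a permutation of tasks ≠ []
    | t0 :: rest => ((rest.foldl pvHeapStep [t0.2]).length : Int)

-- ===== PORT B =====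
-- one iteration of Source B's loop (i is the Python loop index)
def pvBStep (ts : List (Int × Int)) (best : Int) (i : Int) : Int :=
  let s := (PySem.List.pyGetD ts i (0, 0)).1                   -- 's = tasks[i][0]'
  let running := (PySem.List.slice ts none (some i)).foldl     -- 'running = 1 + sum(1 for _, e in tasks[:i] if e > s)'
    (fun c q => if s < q.2 then c + 1 else c) 1
  max best running                                             -- 'best = max(best, running)'

def minimum_machines_alt (tasks : List (Int × Int)) : Int :=
  let ts := PySem.List.sorted tasks (fun x => x.1) false
  (PySem.List.pyRange 0 (PySem.List.len ts) 1).foldl (pvBStep ts) 0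

-- ===== PRECONDITION & SPEC =====
def Spec_minimum_machines (tasks : List (Int × Int)) (out : Int) : Prop := out = minimum_machines_alt tasks
instance (tasks : List (Int × Int)) (out : Int) : Decidable (Spec_minimum_machines tasks out) := by unfold Spec_minimum_machines; infer_instance

-- ===== CLAIM (what is proved, stated in full; the proofs are below) =====
def Claim_equal_minimum_machines : Prop := ∀ (tasks : List (Int × Int)), Dom_minimum_machines tasks → Spec_minimum_machines tasks (minimum_machines tasks)

-- ===== LEMMAS AND PROOFS =====

-- the demand Source B computes at a task t whose strict predecessors (in sorted order) are `pref`
def pvCval (pref : List (Int × Int)) (t : Int × Int) : Int :=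
  (pref.countP (fun q => decide (t.1 < q.2)) : Int) + 1

-- Source B's loop, abstractly: running max of pvCval over growing prefixes
def pvBestAux : List (Int × Int) → List (Int × Int) → Int → Int
  | _, [], b => b
  | p, t :: rest, b => pvBestAux (p ++ [t]) rest (max b (pvCval p t))

lemma pv_foldl_count (l : List (Int × Int)) (s a : Int) :
    l.foldl (fun c q => if s < q.2 then c + 1 else c) a
      = a + (l.countP (fun q => decide (s < q.2)) : Int) := by
  induction l generalizing a with
  | nil => simp
  | cons q l ih =>
    by_cases hq : s < q.2
    · simp [hq, ih]; ring
    · simp [hq, ih]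

-- B's port computes pvBestAux
lemma pvB_fold (ts : List (Int × Int)) :
    ∀ (n k : Nat) (b : Int), ts.length - k = n → k ≤ ts.length →
      (PySem.List.pyRange (k : Int) (PySem.List.len ts) 1).foldl (pvBStep ts) b
        = pvBestAux (ts.take k) (ts.drop k) b := by
  intro n
  induction n with
  | zero =>
    intro k b hn hk
    have hk' : k = ts.length := by omega
    subst hk'
    rw [PySem.List.pyRange_one_eq_nil (by simp)]
    simp [pvBestAux]
  | succ n ih =>
    intro k b hn hk
    have hlt : k < ts.length := by omega
    rw [PySem.List.pyRange_one_cons (by simp; omega), List.foldl_cons]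
    have hget : PySem.List.pyGetD ts (k : Int) ((0 : Int), (0 : Int)) = ts[k] := by
      rw [PySem.List.pyGetD_natCast]
      exact List.getD_eq_getElem ts _ hlt
    have hslice : PySem.List.slice ts none (some (k : Int)) = ts.take k :=
      PySem.List.slice_to_natCast ts k
    have hstep : pvBStep ts b (k : Int) = max b (pvCval (ts.take k) ts[k]) := by
      rw [pvBStep, hget, hslice, pv_foldl_count, pvCval]
      omega
    rw [hstep]
    have hdrop : ts.drop k = ts[k] :: ts.drop (k + 1) := List.drop_eq_getElem_cons hlt
    have htake : ts.take (k + 1) = ts.take k ++ [ts[k]] := by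
      rw [List.take_add_one, List.getElem?_eq_getElem hlt]
      rfl
    rw [hdrop, pvBestAux]
    have hcast2 : ((k : Int) + 1) = ((k + 1 : Nat) : Int) := by push_cast; ring
    rw [hcast2, ih (k + 1) _ (by omega) (by omega), htake]

-- A's heap loop computes pvBestAux: invariant — the heap h together with the multiset `popped`
-- of already-popped ends is a permutation of the ends of the processed prefix p, every popped
-- end is ≤ every remaining start, and the running best b equals the heap size.
lemma pvA_loop :
    ∀ (rest p : List (Int × Int)) (h popped : List Int) (b : Int),
      (p.map Prod.snd).Perm (h ++ popped) →
      (∀ x ∈ popped, ∀ q ∈ rest, x ≤ q.1) →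
      rest.Pairwise (fun a c => a.1 ≤ c.1) →
      (h.length : Int) = b →
      ((rest.foldl pvHeapStep h).length : Int) = pvBestAux p rest b := by
  intro rest
  induction rest with
  | nil =>
    intro p h popped b _ _ _ hb
    simpa [pvBestAux] using hb
  | cons t rest ih =>
    intro p h popped b hperm hpop hsorted hb
    rw [List.foldl_cons, pvBestAux]
    -- the demand at t, reduced to a count over the heap
    have hcval : pvCval p t = (h.countP (fun x => decide (t.1 < x)) : Int) + 1 := by
      have h2 : p.countP (fun q => decide (t.1 < q.2))
          = (p.map Prod.snd).countP (fun x => decide (t.1 < x)) := by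
        rw [List.countP_map]; rfl
      have h3 : (p.map Prod.snd).countP (fun x => decide (t.1 < x))
          = h.countP (fun x => decide (t.1 < x))
            + popped.countP (fun x => decide (t.1 < x)) := by
        rw [hperm.countP_eq, List.countP_append]
      have h4 : popped.countP (fun x => decide (t.1 < x)) = 0 := by
        apply List.countP_eq_zero.mpr
        intro x hx
        have := hpop x hx t (by simp)
        simpa using (by omega : ¬ t.1 < x)
      rw [pvCval, h2, h3, h4]
      push_cast
      ring
    have hpop' : ∀ x ∈ popped, ∀ q ∈ rest, x ≤ q.1 := fun x hx q hq =>
      hpop x hx q (List.mem_cons_of_mem _ hq)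
    have hfuture : ∀ q ∈ rest, t.1 ≤ q.1 := fun q hq =>
      (List.pairwise_cons.mp hsorted).1 q hq
    have hsorted' := (List.pairwise_cons.mp hsorted).2
    rcases hmin : PySem.List.min? h (fun x => x) with _ | m
    · -- empty heap (unreachable in A, but the invariant closes it anyway)
      have hnil : h = [] := (PySem.List.min?_eq_none_iff h (fun x => x)).mp hmin
      subst hnil
      have hb0 : b = 0 := by simpa using hb.symm
      have hstep : pvHeapStep [] t = [t.2] := by simp [pvHeapStep, hmin]
      rw [hstep]
      have hcv : pvCval p t = 1 := by simpa using hcval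
      rw [hcv, hb0]
      apply ih (p ++ [t]) [t.2] popped 1 ?_ hpop' hsorted' (by simp)
      have e1 : (p.map Prod.snd ++ [t.2]).Perm (popped ++ [t.2]) := by
        simpa using hperm.append_right [t.2]
      have e2 : (popped ++ [t.2]).Perm (t.2 :: popped) := List.perm_append_singleton _ _
      simpa using e1.trans e2
    · have hm : m ∈ h := PySem.List.min?_mem hmin
      have hperm_m : h.Perm (m :: h.erase m) := List.perm_cons_erase hm
      by_cases hcond : m ≤ t.1
      · -- pop branch: heap size unchanged, new demand ≤ b
        have hstep : pvHeapStep h t = t.2 :: h.erase m := by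
          simp [pvHeapStep, hmin, hcond]
        have hcnt_erase : h.countP (fun x => decide (t.1 < x))
            = (h.erase m).countP (fun x => decide (t.1 < x)) := by
          have hnotlt : ¬ t.1 < m := by omega
          rw [hperm_m.countP_eq, List.countP_cons]
          simp [hnotlt]
        have hlen_erase : (h.erase m).length + 1 = h.length := by
          have := hperm_m.length_eq
          simpa using this.symm
        have hcle : pvCval p t ≤ b := by
          rw [hcval, hcnt_erase]
          have := List.countP_le_length (l := h.erase m) (p := fun x => decide (t.1 < x))
          omega
        have hmax : max b (pvCval p t) = b := max_eq_left hcle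
        rw [hstep, hmax]
        apply ih (p ++ [t]) (t.2 :: h.erase m) (m :: popped) b ?_ ?_ hsorted' ?_
        · have e1 : (p.map Prod.snd ++ [t.2]).Perm ((h ++ popped) ++ [t.2]) :=
            hperm.append_right _
          have e2 : ((h ++ popped) ++ [t.2]).Perm (t.2 :: (h ++ popped)) :=
            List.perm_append_singleton _ _
          have e3 : (t.2 :: (h ++ popped)).Perm (t.2 :: (m :: (h.erase m ++ popped))) :=
            (hperm_m.append_right popped).cons _
          have e4 : (m :: (h.erase m ++ popped)).Perm (h.erase m ++ m :: popped) :=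
            List.perm_middle.symm
          simpa using ((e1.trans e2).trans e3).trans (e4.cons t.2)
        · intro x hx q hq
          rcases List.mem_cons.mp hx with hx1 | hx2
          · subst hx1; exact le_trans hcond (hfuture q hq)
          · exact hpop' x hx2 q hq
        · simp only [List.length_cons]
          omega
      · -- no pop: every heap element is > t.1, heap grows, new demand = b + 1
        have hstep : pvHeapStep h t = t.2 :: h := by
          simp [pvHeapStep, hmin, hcond]
        have hall : ∀ x ∈ h, t.1 < x := by
          intro x hx
          have := PySem.List.min?_isMin hmin x hx
          simp only at this
          omega
        have hcnt_full : h.countP (fun x => decide (t.1 < x)) = h.length :=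
          List.countP_eq_length.mpr (fun x hx => by simpa using hall x hx)
        have hcv : pvCval p t = b + 1 := by
          rw [hcval, hcnt_full]; omega
        have hmax : max b (pvCval p t) = b + 1 := by
          rw [hcv]; omega
        rw [hstep, hmax]
        apply ih (p ++ [t]) (t.2 :: h) popped (b + 1) ?_ hpop' hsorted' ?_
        · have e1 : (p.map Prod.snd ++ [t.2]).Perm ((h ++ popped) ++ [t.2]) :=
            hperm.append_right _
          have e2 : ((h ++ popped) ++ [t.2]).Perm (t.2 :: (h ++ popped)) :=
            List.perm_append_singleton _ _
          simpa using e1.trans e2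
        · simp only [List.length_cons]
          omega

-- ===== VERDICT (by name: the statement is the Claim_ definition above) =====
theorem minimum_machines_spec : Claim_equal_minimum_machines := by
  intro tasks _
  unfold Spec_minimum_machines
  by_cases htask : tasks = []
  · subst htask; rfl
  · rcases hts : PySem.List.sorted tasks (fun x => x.1) false with _ | ⟨t0, rest⟩
    · exact absurd ((PySem.List.sorted_eq_nil_iff tasks (fun x => x.1) false).mp hts) htask
    · have hA : minimum_machines tasks = ((rest.foldl pvHeapStep [t0.2]).length : Int) := by
        rw [minimum_machines, if_neg htask]
        simp only [hts]
      have hB : minimum_machines_alt tasks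
          = (PySem.List.pyRange 0 (PySem.List.len (t0 :: rest)) 1).foldl
              (pvBStep (t0 :: rest)) 0 := by
        rw [minimum_machines_alt]
        simp only [hts]
      rw [hA, hB]
      have hfold := pvB_fold (t0 :: rest) (t0 :: rest).length 0 0 rfl (by omega)
      simp only [Nat.cast_zero, List.take_zero, List.drop_zero] at hfold
      rw [hfold, pvBestAux]
      have hcv : pvCval [] t0 = 1 := by simp [pvCval]
      rw [hcv]
      have hpw : rest.Pairwise (fun a c : Int × Int => a.1 ≤ c.1) := by
        have := PySem.List.sorted_pairwise (xs := tasks) (key := fun x : Int × Int => x.1)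
        rw [hts] at this
        exact (List.pairwise_cons.mp this).2
      have := pvA_loop rest [t0] [t0.2] [] 1 (by simp) (by simp) hpw (by simp)
      simpa using this
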